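/- GENERATED by mk_final_copies.py from the proof of the farm's unit `start_decoder.R1d` (farm:start_decoder.R1d.1: Proof.lean) as the
   re-elaboration sweep compiled it — do not edit. -/
import Asan.CheckWalk
import Vorbis.Spec.Units.start_decoder_R1d

open X86 X86.User Asan Vorbis Vorbis.Spec Vorbis.Spec.StartDecoder

set_option maxRecDepth 4000
set_option maxHeartbeats 4000000

namespace Vorbis.Spec.start_decoder_R1d

/-- **Segment R1d of `start_decoder`** (`cut234` 0x11597b … 0x11597f → `pc_R2` 0x115982): `r14d = dword [R + 24H]` = Z24 = 0, the
counter of loop 4043. No memory change: the point is carried with the new program counter; the loop's transient is pure logic —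
`ResTrans` with `i = 0` (`A6c := A.1`: R2 from `since`, no finished record) and `ResidueZeroFrom … 0` from the zero bytes of the memset. -/
theorem segR1d_walk {Lay : Layout} (hLay : Lay.hi = 0x1000000) {μ : Microarch} (hμ : UserX.MicroOK μ) {u₀ : State}
    (hcode : HasCodeNat Lay u₀ Vorbis.L.start_decoder.entry Vorbis.Code.code_start_decoder.nat Vorbis.L.start_decoder.size)
    {g : Ghost} {v : State} {A6 : Arena} {A : Arena × List Obj} {rc : Nat} (hb : BodyR1c u₀ g A6 A rc v) :
    ReachVia Lay μ WayInv v (fun w => AtR2 u₀ g 0 w) := by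
  have hpt := hb.pt
  have hfr := hpt.frame
  have hh := hpt.hand
  have hm := hpt.mid
  have hp : Pos g A := hpt.pos
  have he := hfr.entry
  v_entry he
  obtain ⟨hRa, hR8⟩ := hfr.r_eq
  simp only [steady, Ghost.RA] at hRa
  simp only [depth] at he_room he_stack
  have hRn : (addr g.R).toNat = g.R := toNat_addr _ (by omega)
  have w_rip := hfr.rip
  have c_rsp := hfr.rsp
  have c_rbp := hpt.rbp
  have w_eq : Mem.EqOn Vorbis.L.textLo Vorbis.L.textHi u₀.mem v.mem := hfr.code
  have hdf : v.flags .df = false := (show abiInv _ from hfr.inv).1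
  have hmx : v.mxcsr &&& 0x1F80 = 0x1F80 := (show abiInv _ from hfr.inv).2
  have hsse := Vorbis.sseOK_of_abiInv hfr.inv
  u_walk hcode [hμ.vendor] until [Vorbis.L.start_decoder.cut235] span [Vorbis.L.textLo, Vorbis.L.textHi] side (v_side)
  -- 0x11597b `mov eax, [rsp + 24H]`, 0x11597f `mov r14d, eax`: the memory is that of `v`, r14 = Z24 = 0
  have hz24 : v.mem.readLE (addr g.R + 36) 4 = 0 := by
    have h0 := hm.consts.z24 (by omega) (by omega)
    unfold Mem.u32 at h0
    rw [← addr_add_lit] at h0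
    exact h0
  have hr14 : s_11597f.reg .r14 = addr 0 := by
    rw [w_r14, hz24]
    rfl
  have habi : abiInv s_11597f := by
    refine Vorbis.abiInv_of ?_ ?_
    · rw [w_flags]
      exact hdf
    · rw [w_mxcsr]
      exact hmx
  have hs : Mem.SameExcept [] v.mem s_11597f.mem := by
    rw [w_mem]
    exact Mem.SameExcept.refl _ _
  have hun : ShadowUntouched v.mem s_11597f.mem := by
    rw [w_mem]
    exact fun _ _ _ => rfl
  have hrsp : s_11597f.reg .rsp = addr g.R := by
    rw [w_kept.get .rsp rfl]
    exact c_rsp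
  have hfr' : Frame u₀ g pc_R2 A s_11597f :=
    hfr.carry_sec hp hs hun (fun x hx => absurd hx List.not_mem_nil) w_rip hrsp w_eq habi
  have hm' : Mid g 6 6 7 A6 A s_11597f.mem := by
    rw [w_mem]
    exact hm
  have hcnt : stb_vorbis.residue_count s_11597f.mem g.f = (rc : Int) := by
    rw [w_mem]
    exact hb.count
  have hlo := hb.rc_lo
  have hhi := hb.rc_hi
  -- RES(0) with the ages of its blocks: `residue_config` allocated since `A6`, a block of `A6c := A.1`; no finished record
  have hR2 : Since A6 A.1 ⟨stb_vorbis.residue_config s_11597f.mem g.f,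
      Off.sizeof.Residue * (stb_vorbis.residue_count s_11597f.mem g.f).toNat⟩ := by
    have e : Off.sizeof.Residue * (stb_vorbis.residue_count s_11597f.mem g.f).toNat = 32 * rc := by
      rw [hcnt]
      simp only [voff, Int.toNat_natCast]
    rw [e, w_mem]
    exact hb.since
  have hres : ResTrans A6 A.1 A.1 A.1 s_11597f.mem g.f 0 :=
    { ext6 := hm.extc
      ext6c := Arena.Extends.refl _
      exti := Arena.Extends.refl _
      n_le := by
        rw [hcnt]
        omega
      R1 := by
        rw [hcnt]
        omega
      R2 := hR2
      R3 := fun i' hi' => absurd hi' (Nat.not_lt_zero _)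
      record := fun i' hi' => absurd hi' (Nat.not_lt_zero _) }
  -- RES(0), the zero part: every record is all-zero after the memset
  have hzero : ResidueZeroFrom s_11597f.mem g.f 0 := by
    apply ResidueZeroFrom.of_bytes
    intro i _ hi k hk
    rw [hcnt] at hi
    simp only [voff] at hk
    simp only [stb_vorbis.residue_config_at, voff]
    rw [w_mem]
    have h0 := hb.zero (32 * i + k) (by omega)
    rw [← Nat.add_assoc] at h0
    exact h0
  refine ReachVia.done ⟨A6, A.1, A, ⟨⟨hfr', hh, hm', ?_, hres, hzero⟩, ?_, hr14⟩⟩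
  · rw [hcnt]
    omega
  · rw [w_kept.get .rbp rfl]
    exact c_rbp

end Vorbis.Spec.start_decoder_R1d

/-- The unit `start_decoder.R1d`: `segR1d_walk` at every entry state. -/
theorem Vorbis.Spec.Worked.start_decoder_R1d_ok : Vorbis.Spec.start_decoder_R1d.Statement := by
  intro Lay hLay μ hμ u₀ hcode g v hat
  obtain ⟨A6, A, rc, hb⟩ := hat
  exact Vorbis.Spec.start_decoder_R1d.segR1d_walk hLay hμ hcode hb
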